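-- pv_equiv track=rewrite | github.com/lxylxy123456/algorithms | include_check.py | reorder_includes
-- ===== SOURCE A (Python) =====
-- def reorder_includes(pathname, includes):
-- 	if not includes:
-- 		return []
-- 	anss = []
-- 	includes = set(includes)
-- 	'' in includes and includes.remove('')
-- 	if pathname.endswith('.cpp'):
-- 		assert pathname.startswith('src/')
-- 		name = pathname[4:-8]
-- 		include_name = '#include "%s.hpp"' % name
-- 		includes.remove(include_name)
-- 		anss.append([include_name])
-- 	i1 = []
-- 	i2 = []
-- 	for i in includes:
-- 		if i.endswith('>'):
-- 			i1.append(i)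
-- 		else:
-- 			i2.append(i)
-- 	i1 and anss.append(sorted(i1))
-- 	i2 and anss.append(sorted(i2))
-- 	ans = []
-- 	for i in anss:
-- 		for j in i:
-- 			ans.append(j)
-- 		ans.append('')
-- 	assert ans.pop(-1) == ''
-- 	return ans
-- ===== SOURCE B (Python) =====
-- def reorder_includes(pathname, includes):
-- 	if not includes:
-- 		return []
-- 	rest = set(includes) - {''}
-- 	tagged = []
-- 	if pathname.endswith('.cpp'):
-- 		assert pathname.startswith('src/')
-- 		self_inc = '#include "%s.hpp"' % pathname[4:-8]
-- 		rest.remove(self_inc)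
-- 		tagged.append('0' + self_inc)
-- 	for i in rest:
-- 		tagged.append(('1' if i.endswith('>') else '2') + i)
-- 	tagged.sort()
-- 	out = []
-- 	prev = ''
-- 	for t in tagged:
-- 		if prev and t[:1] != prev:
-- 			out.append('')
-- 		out.append(t[1:])
-- 		prev = t[:1]
-- 	return out
-- ===== Notes on version B (the rewrite author's own statement) =====
-- stated objective: alternative
-- what changed: B replaces A's partition-into-groups / per-group sorts / append-''-then-pop pipeline with decorate-sort-undecorate: each surviving include is tagged with a one-character class key ('0' cpp self-include, '1' angle, '2' quote), the tagged strings are sorted in ONE sort, and a single scan strips the tags and inserts a blank line exactly where the class character changes.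
import Mathlib
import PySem

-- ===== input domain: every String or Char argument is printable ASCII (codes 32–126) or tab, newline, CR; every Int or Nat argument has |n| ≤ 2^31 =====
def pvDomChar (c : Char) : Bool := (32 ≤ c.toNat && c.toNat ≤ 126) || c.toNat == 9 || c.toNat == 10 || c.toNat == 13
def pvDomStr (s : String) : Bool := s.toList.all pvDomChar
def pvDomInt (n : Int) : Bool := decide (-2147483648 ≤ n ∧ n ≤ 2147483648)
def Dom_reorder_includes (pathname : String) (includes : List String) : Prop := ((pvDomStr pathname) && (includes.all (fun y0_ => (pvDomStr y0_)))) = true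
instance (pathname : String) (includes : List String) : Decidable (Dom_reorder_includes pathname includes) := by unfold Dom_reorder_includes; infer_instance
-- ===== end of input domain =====

-- B replaces A's partition-into-groups / per-group sorts / append-''-then-pop pipeline with a
-- decorate-sort-undecorate pass: every surviving include is tagged with a one-character class
-- key ('0' cpp self-include, '1' angle, '2' quote), the tagged strings are sorted ONCE, and one
-- scan strips the tags, inserting a blank line exactly where the class character changes.
-- Objective: alternative (same asymptotic cost, genuinely different algorithm).

-- shared helper: the '#include "%s.hpp"' % pathname[4:-8] name both Pythons compute
def pvIncName (pathname : String) : String :=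
  "#include \"" ++ PySem.Str.slice pathname (some 4) (some (-8)) ++ ".hpp\""

-- ===== PORT A =====
def reorder_includes (pathname : String) (includes : List String) : List String :=
  if includes = [] then []
  else
    -- includes = set(includes); '' in includes and includes.remove('')
    let inc0 : PySem.Set String := PySem.Set.ofList includes
    let inc1 : PySem.Set String :=
      if PySem.Set.contains inc0 "" then PySem.Set.discard inc0 "" else inc0
    -- the cpp branch; 'none' marks the raise sites (failed assert / KeyError), excluded by Pre_
    let step : Option (List (List String) × PySem.Set String) :=
      if PySem.Str.endswith pathname ".cpp" then
        if PySem.Str.startswith pathname "src/" then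
          match PySem.Set.remove? inc1 (pvIncName pathname) with
          | some inc2 => some ([[pvIncName pathname]], inc2)
          | none => none
        else none
      else some ([], inc1)
    match step with
    | none => []
    | some (anss₀, incs) =>
      -- for i in includes: append to i1 / i2
      let p := incs.foldl (fun (q : List String × List String) i =>
          if PySem.Str.endswith i ">" then (q.1 ++ [i], q.2) else (q.1, q.2 ++ [i])) ([], [])
      let anss₁ := if p.1 ≠ [] then anss₀ ++ [PySem.List.sorted p.1 (fun x => x)] else anss₀
      let anss₂ := if p.2 ≠ [] then anss₁ ++ [PySem.List.sorted p.2 (fun x => x)] else anss₁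
      -- flatten, '' after every group, then pop the trailing '' (IndexError → none, excluded)
      let ans := anss₂.foldl (fun acc g => (g.foldl (fun a j => a ++ [j]) acc) ++ [""]) []
      match PySem.List.pop? ans (-1) with
      | none => []
      | some (v, rest) => if v = "" then rest else []

-- ===== PORT B =====
-- Source B's loop body over the sorted tagged list: strip the tag, emit '' on a class change
def pvStep (st : List String × String) (t : String) : List String × String :=
  ((if st.2 ≠ "" ∧ PySem.Str.slice t none (some 1) ≠ st.2 then st.1 ++ [""] else st.1)
     ++ [PySem.Str.slice t (some 1) none],
   PySem.Str.slice t none (some 1))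

def reorder_includes_alt (pathname : String) (includes : List String) : List String :=
  if includes = [] then []
  else
    -- rest = set(includes) - {''}
    let rest : PySem.Set String := PySem.Set.diff (PySem.Set.ofList includes) (PySem.Set.ofList [""])
    let step : Option (List String × PySem.Set String) :=
      if PySem.Str.endswith pathname ".cpp" then
        if PySem.Str.startswith pathname "src/" then
          (PySem.Set.remove? rest (pvIncName pathname)).map
            (fun r => (["0" ++ pvIncName pathname], r))
        else none
      else some ([], rest)
    match step with
    | none => []
    | some (tagged0, rest2) =>
      -- for i in rest: tagged.append(('1' if i.endswith('>') else '2') + i)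
      let tagged := rest2.foldl (fun acc i =>
          acc ++ [(if PySem.Str.endswith i ">" then "1" else "2") ++ i]) tagged0
      -- tagged.sort()
      let ts := PySem.List.sorted tagged (fun x => x)
      -- out/prev scan: blank line exactly where the class character changes
      (ts.foldl pvStep ([], "")).1

-- ===== PRECONDITION & SPEC =====
-- Pre_ excludes exactly the inputs on which A raises: a '.cpp' pathname not starting with
-- 'src/' (AssertionError) or whose self-include is missing from the list (KeyError), and a
-- nonempty non-cpp list whose includes are all '' (the final pop raises IndexError).
def Pre_reorder_includes (pathname : String) (includes : List String) : Prop :=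
  includes = [] ∨
    (if PySem.Str.endswith pathname ".cpp" = true then
       PySem.Str.startswith pathname "src/" = true ∧ pvIncName pathname ∈ includes
     else ∃ i ∈ includes, i ≠ "")
instance (pathname : String) (includes : List String) : Decidable (Pre_reorder_includes pathname includes) := by unfold Pre_reorder_includes; infer_instance
def pvWitness_reorder_includes : String × List String := ("x.py", ["#include <vector>", "\"a\""])
def Spec_reorder_includes (pathname : String) (includes : List String) (out : List String) : Prop := out = reorder_includes_alt pathname includes
instance (pathname : String) (includes : List String) (out : List String) : Decidable (Spec_reorder_includes pathname includes out) := by unfold Spec_reorder_includes; infer_instance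

-- ===== CLAIM (what is proved, stated in full; the proofs are below) =====
def Claim_equal_reorder_includes : Prop := ∀ (pathname : String) (includes : List String), Dom_reorder_includes pathname includes → Pre_reorder_includes pathname includes → Spec_reorder_includes pathname includes (reorder_includes pathname includes)
-- ===== LEMMAS AND PROOFS =====

theorem pvIncName_ne_empty (pathname : String) : pvIncName pathname ≠ "" := by
  unfold pvIncName; intro h; apply_fun String.toList at h; simp at h

-- A's pair-building loop is a pair of filters
theorem pv_pair_fold (l : List String) :
    l.foldl (fun (q : List String × List String) i =>
        if PySem.Str.endswith i ">" then (q.1 ++ [i], q.2) else (q.1, q.2 ++ [i])) ([], [])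
      = (l.filter (fun i => PySem.Str.endswith i ">"),
         l.filter (fun i => !PySem.Str.endswith i ">")) := by
  have hfun : (fun (q : List String × List String) i =>
      if PySem.Str.endswith i ">" then (q.1 ++ [i], q.2) else (q.1, q.2 ++ [i]))
      = (fun (q : List String × List String) i =>
        ((if PySem.Str.endswith i ">" then q.1 ++ [i] else q.1),
         (if !PySem.Str.endswith i ">" then q.2 ++ [i] else q.2))) := by
    funext q i
    cases h : PySem.Str.endswith i ">" <;> simp [h]
  have hp := PySem.List.foldl_prod_mk
    (fun (a : List String) (i : String) => if PySem.Str.endswith i ">" then a ++ [i] else a)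
    (fun (b : List String) (i : String) => if !PySem.Str.endswith i ">" then b ++ [i] else b)
    l [] []
  rw [hfun, hp,
    PySem.List.foldl_append_if_eq_filter, PySem.List.foldl_append_if_eq_filter]
  simp

-- A's flatten-from-[] is the flatten of the groups, each closed by ''
theorem pv_flatA (l : List (List String)) (acc : List String) :
    l.foldl (fun acc g => (g.foldl (fun a j => a ++ [j]) acc) ++ [""]) acc
      = acc ++ (l.map (fun g => g ++ [""])).flatten := by
  induction l generalizing acc with
  | nil => simp
  | cons g gs ih =>
    rw [List.foldl_cons, PySem.List.foldl_append_singleton, ih]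
    simp

-- the head-first join of later groups
theorem pv_flatB (gs : List (List String)) (g : List String) :
    gs.foldl (fun out h => out ++ [""] ++ h) g
      = g ++ (gs.map (fun h => "" :: h)).flatten := by
  induction gs generalizing g with
  | nil => simp
  | cons h t ih => simp

-- bridge between the two flatten shapes
theorem pv_flat_bridge (gs : List (List String)) (g : List String) :
    g ++ [""] ++ (gs.map (fun h => h ++ [""])).flatten
      = (g ++ (gs.map (fun h => "" :: h)).flatten) ++ [""] := by
  induction gs generalizing g with
  | nil => simp
  | cons h t ih =>
    have := ih (g ++ "" :: h)
    simp only [List.map_cons, List.flatten_cons, List.append_assoc] at *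
    simpa using this

-- A's append-then-pop over a group list = head-first join of the same group list
theorem pv_flat_eq (gl : List (List String)) :
    (match PySem.List.pop?
        (gl.foldl (fun acc g => (g.foldl (fun a j => a ++ [j]) acc) ++ [""]) []) (-1) with
     | none => ([] : List String)
     | some (v, rest) => if v = "" then rest else [])
    = (match gl with
       | [] => []
       | g :: gs => gs.foldl (fun out h => out ++ [""] ++ h) g) := by
  cases gl with
  | nil => simp [PySem.List.pop?, PySem.List.pyIdx?]
  | cons g gs =>
    simp only [pv_flatA, List.nil_append, List.map_cons, List.flatten_cons, pv_flatB]
    rw [pv_flat_bridge gs g, PySem.List.pop?_last]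
    simp

-- membership in A's set after the '' removal
theorem pv_memA (includes : List String) (x : String) :
    (x ∈ (if PySem.Set.contains (PySem.Set.ofList includes) "" then
            PySem.Set.discard (PySem.Set.ofList includes) ""
          else PySem.Set.ofList includes))
      ↔ x ∈ includes ∧ x ≠ "" := by
  split
  · next h =>
    rw [PySem.Set.mem_discard, PySem.Set.mem_ofList]
  · next h =>
    rw [PySem.Set.mem_ofList]
    constructor
    · intro hx
      refine ⟨hx, ?_⟩
      rintro rfl
      exact h (by rw [PySem.Set.contains_iff, PySem.Set.mem_ofList]; exact hx)
    · exact fun hx => hx.1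

-- membership in B's set
theorem pv_memB (includes : List String) (x : String) :
    x ∈ PySem.Set.diff (PySem.Set.ofList includes) (PySem.Set.ofList [""])
      ↔ x ∈ includes ∧ x ≠ "" := by
  rw [PySem.Set.mem_diff, PySem.Set.mem_ofList, PySem.Set.mem_ofList]
  simp

-- A's ''-stripped set is nodup and a permutation of B's set
theorem pv_base_nodupA (includes : List String) :
    (if PySem.Set.contains (PySem.Set.ofList includes) "" then
        PySem.Set.discard (PySem.Set.ofList includes) ""
      else PySem.Set.ofList includes).Nodup := by
  split
  · exact PySem.Set.nodup_discard _ _ (PySem.Set.nodup_ofList includes)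
  · exact PySem.Set.nodup_ofList includes

theorem pv_base_nodupB (includes : List String) :
    (PySem.Set.diff (PySem.Set.ofList includes) (PySem.Set.ofList [""])).Nodup :=
  PySem.Set.nodup_diff _ _ (PySem.Set.nodup_ofList includes)

theorem pv_base_perm (includes : List String) :
    (if PySem.Set.contains (PySem.Set.ofList includes) "" then
        PySem.Set.discard (PySem.Set.ofList includes) ""
      else PySem.Set.ofList includes).Perm
      (PySem.Set.diff (PySem.Set.ofList includes) (PySem.Set.ofList [""])) := by
  rw [List.perm_ext_iff_of_nodup (pv_base_nodupA includes) (pv_base_nodupB includes)]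
  intro x
  rw [pv_memA, pv_memB]

-- tag-character slice facts: (c + x)[:1] = c and (c + x)[1:] = x for a one-character tag
theorem pv_slice_head (c : Char) (x : String) :
    PySem.Str.slice (String.ofList [c] ++ x) none (some 1) = String.ofList [c] := by
  simp [PySem.Str.slice, PySem.List.slice_to, String.toList_ofList]

theorem pv_slice_tail (c : Char) (x : String) :
    PySem.Str.slice (String.ofList [c] ++ x) (some 1) none = x := by
  simp [PySem.Str.slice, PySem.List.slice_from, String.toList_ofList]

-- string order through a common or an increasing tag character
theorem pv_lt_same (c : Char) {x y : String} (h : x < y) :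
    String.ofList [c] ++ x < String.ofList [c] ++ y := by
  rw [String.lt_iff_toList_lt] at *
  simp [String.toList_ofList]
  simpa using h

theorem pv_lt_diff {c d : Char} (h : c < d) (x y : String) :
    String.ofList [c] ++ x < String.ofList [d] ++ y := by
  rw [String.lt_iff_toList_lt]
  simp [String.toList_ofList]
  exact List.cons_lt_cons_iff.mpr (Or.inl h)

-- the scan over a class-homogeneous block whose class is already the previous one
theorem pv_emit_same (c : Char) (g : List String) (out : List String) :
    (g.map (fun x => String.ofList [c] ++ x)).foldl pvStep (out, String.ofList [c])
      = (out ++ g, String.ofList [c]) := by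
  induction g generalizing out with
  | nil => simp
  | cons x xs ih =>
    simp only [List.map_cons, List.foldl_cons, pvStep, pv_slice_head, pv_slice_tail,
      ne_eq, not_true_eq_false, and_false, if_false]
    rw [ih]
    simp

-- the scan over a whole class-homogeneous block from an arbitrary previous state
theorem pv_emit_block (c : Char) (g : List String) (out : List String) (p : String) :
    (g.map (fun x => String.ofList [c] ++ x)).foldl pvStep (out, p)
      = if g = [] then (out, p)
        else ((if p ≠ "" ∧ String.ofList [c] ≠ p then out ++ [""] else out) ++ g,
              String.ofList [c]) := by
  cases g with
  | nil => simp
  | cons x xs =>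
    simp only [List.map_cons, List.foldl_cons, pvStep, pv_slice_head, pv_slice_tail]
    rw [pv_emit_same]
    simp

-- the common tail once the deduplicated ''-free remainder is fixed: A's per-group pipeline on
-- sA equals B's tag-sort-scan on sB (sA a permutation of the Nodup sB); inc? is the optional
-- cpp self-include group
theorem pv_cont_eq (inc? : Option String) (sA sB : List String)
    (hnd : sB.Nodup) (hperm : sA.Perm sB) :
    (match PySem.List.pop?
        ((if sA.filter (fun i => !PySem.Str.endswith i ">") ≠ []
          then (if sA.filter (fun i => PySem.Str.endswith i ">") ≠ []
                then (inc?.map (fun n => [n])).toList ++ [PySem.List.sorted (sA.filter (fun i => PySem.Str.endswith i ">")) (fun x => x)]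
                else (inc?.map (fun n => [n])).toList)
               ++ [PySem.List.sorted (sA.filter (fun i => !PySem.Str.endswith i ">")) (fun x => x)]
          else (if sA.filter (fun i => PySem.Str.endswith i ">") ≠ []
                then (inc?.map (fun n => [n])).toList ++ [PySem.List.sorted (sA.filter (fun i => PySem.Str.endswith i ">")) (fun x => x)]
                else (inc?.map (fun n => [n])).toList)).foldl
          (fun acc g => (g.foldl (fun a j => a ++ [j]) acc) ++ [""]) []) (-1) with
     | none => ([] : List String)
     | some (v, rest) => if v = "" then rest else [])
    = ((PySem.List.sorted
          (sB.foldl (fun acc i =>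
              acc ++ [(if PySem.Str.endswith i ">" then "1" else "2") ++ i])
            ((inc?.map (fun n => "0" ++ n)).toList))
          (fun x => x)).foldl pvStep ([], "")).1 := by
  -- A's groups over sA are the sorted groups over sB
  have hA1 : PySem.List.sorted (sA.filter (fun i => PySem.Str.endswith i ">")) (fun x => x)
      = PySem.List.sorted (sB.filter (fun i => PySem.Str.endswith i ">")) (fun x => x) :=
    PySem.List.sorted_eq_sorted_of_perm _ _ _ (fun a b h => h) (hperm.filter _)
  have hA2 : PySem.List.sorted (sA.filter (fun i => !PySem.Str.endswith i ">")) (fun x => x)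
      = PySem.List.sorted (sB.filter (fun i => !PySem.Str.endswith i ">")) (fun x => x) :=
    PySem.List.sorted_eq_sorted_of_perm _ _ _ (fun a b h => h) (hperm.filter _)
  have e1 : (sA.filter (fun i => PySem.Str.endswith i ">") ≠ [])
      = (PySem.List.sorted (sB.filter (fun i => PySem.Str.endswith i ">")) (fun x => x) ≠ []) := by
    have hl := (hperm.filter (fun i => PySem.Str.endswith i ">")).length_eq
    simp only [ne_eq, ← List.length_eq_zero_iff, hl, PySem.List.length_sorted]
  have e2 : (sA.filter (fun i => !PySem.Str.endswith i ">") ≠ [])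
      = (PySem.List.sorted (sB.filter (fun i => !PySem.Str.endswith i ">")) (fun x => x) ≠ []) := by
    have hl := (hperm.filter (fun i => !PySem.Str.endswith i ">")).length_eq
    simp only [ne_eq, ← List.length_eq_zero_iff, hl, PySem.List.length_sorted]
  rw [pv_flat_eq, hA1, hA2]
  simp only [e1, e2]
  -- now abbreviate the two sorted groups
  set S1 := PySem.List.sorted (sB.filter (fun i => PySem.Str.endswith i ">")) (fun x => x) with hS1
  set S2 := PySem.List.sorted (sB.filter (fun i => !PySem.Str.endswith i ">")) (fun x => x) with hS2
  -- B's tagged list, rewritten as tagged0 ++ map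
  rw [PySem.List.foldl_append_singleton_eq_map]
  -- the sorted tagged list is the three class blocks in order
  have hnd1 : S1.Nodup := ((PySem.List.sorted_perm (sB.filter _) (fun x => x) false).nodup_iff).mpr (hnd.filter _)
  have hnd2 : S2.Nodup := ((PySem.List.sorted_perm (sB.filter _) (fun x => x) false).nodup_iff).mpr (hnd.filter _)
  have hsorted : PySem.List.sorted
      ((inc?.map (fun n => "0" ++ n)).toList ++
        sB.map (fun i => (if PySem.Str.endswith i ">" then "1" else "2") ++ i)) (fun x => x)
      = (inc?.map (fun n => String.ofList ['0'] ++ n)).toList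
        ++ S1.map (fun x => String.ofList ['1'] ++ x)
        ++ S2.map (fun x => String.ofList ['2'] ++ x) := by
    apply PySem.List.sorted_eq_of_perm_of_pairwise_lt
    · -- permutation
      have m1 : S1.map (fun x => String.ofList ['1'] ++ x)
          = S1.map (fun i => (if PySem.Str.endswith i ">" then "1" else "2") ++ i) := by
        apply List.map_congr_left
        intro x hx
        have hm : x ∈ sB.filter (fun i => PySem.Str.endswith i ">") :=
          (PySem.List.mem_sorted _ _ _ _).mp hx
        have hpx : PySem.Chars.endswith x.toList ['>'] = true := by
          simpa using (List.mem_filter.mp hm).2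
        simp [hpx]
      have m2 : S2.map (fun x => String.ofList ['2'] ++ x)
          = S2.map (fun i => (if PySem.Str.endswith i ">" then "1" else "2") ++ i) := by
        apply List.map_congr_left
        intro x hx
        have hm : x ∈ sB.filter (fun i => !PySem.Str.endswith i ">") :=
          (PySem.List.mem_sorted _ _ _ _).mp hx
        have hpx : PySem.Chars.endswith x.toList ['>'] = false := by
          simpa using (List.mem_filter.mp hm).2
        simp [hpx]
      rw [List.append_assoc, m1, m2]
      apply List.Perm.append
      · cases inc? <;> rfl
      · have step1 : (S1.map (fun i => (if PySem.Str.endswith i ">" then "1" else "2") ++ i)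
              ++ S2.map (fun i => (if PySem.Str.endswith i ">" then "1" else "2") ++ i)).Perm
            ((sB.filter (fun i => PySem.Str.endswith i ">")).map (fun i => (if PySem.Str.endswith i ">" then "1" else "2") ++ i)
              ++ (sB.filter (fun i => !PySem.Str.endswith i ">")).map (fun i => (if PySem.Str.endswith i ">" then "1" else "2") ++ i)) :=
          List.Perm.append
            ((PySem.List.sorted_perm (sB.filter _) (fun x => x) false).map _)
            ((PySem.List.sorted_perm (sB.filter _) (fun x => x) false).map _)
        have step2 : ((sB.filter (fun i => PySem.Str.endswith i ">")).map (fun i => (if PySem.Str.endswith i ">" then "1" else "2") ++ i)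
              ++ (sB.filter (fun i => !PySem.Str.endswith i ">")).map (fun i => (if PySem.Str.endswith i ">" then "1" else "2") ++ i)).Perm
            (sB.map (fun i => (if PySem.Str.endswith i ">" then "1" else "2") ++ i)) := by
          rw [← List.map_append]
          exact (List.filter_append_perm _ sB).map _
        exact step1.trans step2
    · -- strict pairwise order of the target
      have strict1 : S1.Pairwise (· < ·) := by
        have hle := PySem.List.sorted_pairwise (sB.filter (fun i => PySem.Str.endswith i ">")) (fun x => x)
        exact ((hle.and hnd1).imp (fun h => lt_of_le_of_ne h.1 h.2))
      have strict2 : S2.Pairwise (· < ·) := by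
        have hle := PySem.List.sorted_pairwise (sB.filter (fun i => !PySem.Str.endswith i ">")) (fun x => x)
        exact ((hle.and hnd2).imp (fun h => lt_of_le_of_ne h.1 h.2))
      rw [List.pairwise_append, List.pairwise_append]
      refine ⟨⟨?_, ?_, ?_⟩, ?_, ?_⟩
      · cases inc? <;> simp
      · exact strict1.map _ (fun a b h => pv_lt_same '1' h)
      · rintro a ha b hb
        cases inc? with
        | none => simp at ha
        | some n =>
          simp at ha
          obtain ⟨x, _, rfl⟩ := List.mem_map.mp hb
          subst ha
          exact pv_lt_diff (by decide) n x
      · exact strict2.map _ (fun a b h => pv_lt_same '2' h)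
      · rintro a ha b hb
        obtain ⟨y, _, rfl⟩ := List.mem_map.mp hb
        rcases List.mem_append.mp ha with h0 | h1
        · cases inc? with
          | none => simp at h0
          | some n =>
            simp at h0
            subst h0
            exact pv_lt_diff (by decide) n y
        · obtain ⟨x, _, rfl⟩ := List.mem_map.mp h1
          exact pv_lt_diff (by decide) x y
  have h0 : (inc?.map (fun n => "0" ++ n)).toList
      = (inc?.map (fun n => String.ofList ['0'] ++ n)).toList := rfl
  rw [h0] at hsorted ⊢
  rw [hsorted]
  -- evaluate the scan block by block and compare with the joined groups
  rw [List.foldl_append, List.foldl_append]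
  cases inc? with
  | some n =>
    have hb0 : ([String.ofList ['0'] ++ n] : List String)
        = [n].map (fun x => String.ofList ['0'] ++ x) := by simp
    simp only [Option.map_some, Option.toList_some, hb0]
    rw [pv_emit_block '0', pv_emit_block '1', pv_emit_block '2']
    by_cases h1 : S1 = [] <;> by_cases h2 : S2 = [] <;>
      simp [h1, h2, pv_flatB, (by decide : (String.ofList ['0'] : String) ≠ ""),
        (by decide : (String.ofList ['1'] : String) ≠ ""),
        (by decide : (String.ofList ['2'] : String) ≠ ""),
        (by decide : (String.ofList ['1'] : String) ≠ String.ofList ['0']),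
        (by decide : (String.ofList ['2'] : String) ≠ String.ofList ['0']),
        (by decide : (String.ofList ['2'] : String) ≠ String.ofList ['1'])]
  | none =>
    simp only [Option.map_none, Option.toList_none, List.foldl_nil, List.nil_append]
    rw [pv_emit_block '1', pv_emit_block '2']
    by_cases h1 : S1 = [] <;> by_cases h2 : S2 = [] <;>
      simp [h1, h2, pv_flatB, (by decide : (String.ofList ['1'] : String) ≠ ""),
        (by decide : (String.ofList ['2'] : String) ≠ ""),
        (by decide : (String.ofList ['2'] : String) ≠ String.ofList ['1'])]

-- ===== VERDICT (by name: the statement is the Claim_ definition above) =====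
theorem reorder_includes_spec : Claim_equal_reorder_includes := by
  intro pathname includes _ hpre
  unfold Spec_reorder_includes
  by_cases hnil : includes = []
  · simp [reorder_includes, reorder_includes_alt, hnil]
  · rcases hpre with h | hpre
    · exact absurd h hnil
    by_cases hcpp : PySem.Str.endswith pathname ".cpp" = true
    · rw [if_pos hcpp] at hpre
      obtain ⟨hsrc, hmem⟩ := hpre
      have hne := pvIncName_ne_empty pathname
      have hmA : pvIncName pathname ∈
          (if PySem.Set.contains (PySem.Set.ofList includes) "" then
              PySem.Set.discard (PySem.Set.ofList includes) ""
            else PySem.Set.ofList includes) := (pv_memA includes _).mpr ⟨hmem, hne⟩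
      have hmB : pvIncName pathname ∈
          PySem.Set.diff (PySem.Set.ofList includes) (PySem.Set.ofList [""]) :=
        (pv_memB includes _).mpr ⟨hmem, hne⟩
      simp only [reorder_includes, reorder_includes_alt, hnil, hcpp, hsrc, if_true, if_false,
        PySem.Set.remove?_of_mem hmA, PySem.Set.remove?_of_mem hmB, Option.map_some]
      rw [pv_pair_fold]
      exact pv_cont_eq (some (pvIncName pathname)) _ _
        (PySem.Set.nodup_discard _ _ (pv_base_nodupB includes))
        ((pv_base_perm includes).filter _)
    · simp only [reorder_includes, reorder_includes_alt, hnil, hcpp, if_false,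
        Bool.false_eq_true]
      rw [pv_pair_fold]
      exact pv_cont_eq none _ _ (pv_base_nodupB includes) (pv_base_perm includes)
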